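-- pv_equiv track=rewrite | github.com/shion24hub/compp | abc/220/b.py | base10
-- ===== SOURCE A (Python) =====
-- def base10(n, k) :
--     digit = []
--     while n >= 1 :
--         digit.append(n % 10)
--         n //= 10
--
--     ret = 0
--     for i in range(len(digit)) :
--         ret += (k ** i) * digit[i]
--
--     return ret
-- ===== SOURCE B (Python) =====
-- def base10(n, k):
--     # Horner's method: recursive multiply-add, no digit list, no k**i powers.
--     if n < 1:
--         return 0
--     return base10(n // 10, k) * k + n % 10
-- ===== Notes on version B (the rewrite author's own statement) =====
-- stated objective: simpler
-- what changed: Replaces A's two-phase digit-list build plus power-sum (k**i per digit) with a single recursive Horner multiply-add pass.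
import Mathlib
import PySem

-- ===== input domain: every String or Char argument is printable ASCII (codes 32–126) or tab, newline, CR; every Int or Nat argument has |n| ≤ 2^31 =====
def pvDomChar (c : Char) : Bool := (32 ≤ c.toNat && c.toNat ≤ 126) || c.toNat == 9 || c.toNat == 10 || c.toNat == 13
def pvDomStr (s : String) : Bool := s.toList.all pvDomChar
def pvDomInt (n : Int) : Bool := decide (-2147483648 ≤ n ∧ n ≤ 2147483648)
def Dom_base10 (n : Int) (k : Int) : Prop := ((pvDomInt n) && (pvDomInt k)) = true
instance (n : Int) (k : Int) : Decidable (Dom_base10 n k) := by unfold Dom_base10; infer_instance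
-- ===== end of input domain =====

-- B replaces the digit-list + k**i power-sum with one recursive Horner multiply-add pass (simpler).

-- termination helper for both recursions (cited by name in decreasing_by)
theorem pvFloordivTen_lt (n : Int) (h : 1 ≤ n) :
    (PySem.Int.floordiv n 10).toNat < n.toNat := by
  rw [PySem.Int.floordiv_eq_ediv_of_pos (by norm_num)]
  omega

-- ===== PORT A =====
-- the while-loop: digit.append(n % 10); n //= 10
def pvDigitsA (n : Int) : List Int :=
  if h : 1 ≤ n then
    PySem.Int.mod n 10 :: pvDigitsA (PySem.Int.floordiv n 10)
  else []
termination_by n.toNat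
decreasing_by exact pvFloordivTen_lt n h

def base10 (n : Int) (k : Int) : Int :=
  let digit := pvDigitsA n
  (List.range digit.length).foldl (fun ret i => ret + k ^ i * digit.getD i 0) 0

-- ===== PORT B =====
def base10_alt (n : Int) (k : Int) : Int :=
  if h : n < 1 then 0
  else base10_alt (PySem.Int.floordiv n 10) k * k + PySem.Int.mod n 10
termination_by n.toNat
decreasing_by exact pvFloordivTen_lt n (by omega)

-- ===== PRECONDITION & SPEC =====
def Spec_base10 (n : Int) (k : Int) (out : Int) : Prop := out = base10_alt n k
instance (n : Int) (k : Int) (out : Int) : Decidable (Spec_base10 n k out) := by unfold Spec_base10; infer_instance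

-- ===== CLAIM (what is proved, stated in full; the proofs are below) =====
def Claim_equal_base10 : Prop := ∀ (n : Int) (k : Int), Dom_base10 n k → Spec_base10 n k (base10 n k)

-- ===== LEMMAS AND PROOFS =====

-- Horner value of a little-endian digit list
def pvHorner (k : Int) : List Int → Int
  | [] => 0
  | d :: ds => d + k * pvHorner k ds

theorem pvFoldl_range_horner (k : Int) (xs : List Int) :
    ∀ (j : Nat) (acc : Int),
      (List.range xs.length).foldl (fun ret i => ret + k ^ (i + j) * xs.getD i 0) acc
        = acc + k ^ j * pvHorner k xs := by
  induction xs with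
  | nil => intro j acc; simp [pvHorner]
  | cons x xs ih =>
    intro j acc
    rw [List.length_cons, List.range_succ_eq_map, List.foldl_cons, List.foldl_map]
    have hfun : (fun (ret : Int) (i : Nat) => ret + k ^ (i + 1 + j) * (x :: xs).getD (i + 1) 0)
        = fun (ret : Int) (i : Nat) => ret + k ^ (i + (j + 1)) * xs.getD i 0 := by
      funext ret i
      have he : i + 1 + j = i + (j + 1) := by omega
      rw [he, List.getD_cons_succ]
    rw [hfun, ih (j + 1)]
    simp [pvHorner]
    ring

theorem pvBase10_eq_horner (n k : Int) : base10 n k = pvHorner k (pvDigitsA n) := by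
  have h := pvFoldl_range_horner k (pvDigitsA n) 0 0
  simp only [pow_zero, Nat.add_zero, one_mul, zero_add] at h
  simpa [base10] using h

theorem pvHorner_digits_eq_alt (n k : Int) :
    pvHorner k (pvDigitsA n) = base10_alt n k := by
  by_cases h : n < 1
  · rw [pvDigitsA, base10_alt]
    simp [pvHorner, h, show ¬ (1 ≤ n) by omega]
  · rw [pvDigitsA, base10_alt]
    simp only [show (1 : Int) ≤ n by omega, dif_pos, h, dif_neg, not_false_iff]
    rw [pvHorner, pvHorner_digits_eq_alt (PySem.Int.floordiv n 10) k]
    ring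
termination_by n.toNat
decreasing_by exact pvFloordivTen_lt n (by omega)

-- ===== VERDICT (by name: the statement is the Claim_ definition above) =====
theorem base10_spec : Claim_equal_base10 := by
  intro n k _
  unfold Spec_base10
  rw [pvBase10_eq_horner, pvHorner_digits_eq_alt]
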